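-- pv_equiv track=rewrite | github.com/Valalol/Advent-of-Code | Day2/Day2.py | get_max_color
-- ===== SOURCE A (Python) =====
-- def get_max_color(data):
--     new_data = []
--     for game in data:
--         game_max = [0,0,0]
--         for pick in game:
--             for i in range(3):
--                 if pick[i] > game_max[i]:
--                     game_max[i] = pick[i]
--         new_data.append(game_max)
--     return new_data
-- ===== SOURCE B (Python) =====
-- def _combine(p, q):
--     return (max(p[0], q[0]), max(p[1], q[1]), max(p[2], q[2]))
--
-- def _reduce(game, lo, hi):
--     # divide-and-conquer componentwise-max reduction of game[lo:hi] (hi > lo)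
--     if hi - lo == 1:
--         p = game[lo]
--         return (p[0], p[1], p[2])
--     mid = (lo + hi) // 2
--     return _combine(_reduce(game, lo, mid), _reduce(game, mid, hi))
--
-- def get_max_color(data):
--     out = []
--     for game in data:
--         if not game:
--             out.append([0, 0, 0])
--         else:
--             m = _combine((0, 0, 0), _reduce(game, 0, len(game)))
--             out.append([m[0], m[1], m[2]])
--     return out
-- ===== Notes on version B (the rewrite author's own statement) =====
-- stated objective: alternative
-- what changed: Replaces A's sequential running-max vector updated pick by pick with a divide-and-conquer reduction: each game is split recursively in half and the per-color maxima of the halves are merged with a componentwise-max combiner (0-seeded at the top).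
import Mathlib
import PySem

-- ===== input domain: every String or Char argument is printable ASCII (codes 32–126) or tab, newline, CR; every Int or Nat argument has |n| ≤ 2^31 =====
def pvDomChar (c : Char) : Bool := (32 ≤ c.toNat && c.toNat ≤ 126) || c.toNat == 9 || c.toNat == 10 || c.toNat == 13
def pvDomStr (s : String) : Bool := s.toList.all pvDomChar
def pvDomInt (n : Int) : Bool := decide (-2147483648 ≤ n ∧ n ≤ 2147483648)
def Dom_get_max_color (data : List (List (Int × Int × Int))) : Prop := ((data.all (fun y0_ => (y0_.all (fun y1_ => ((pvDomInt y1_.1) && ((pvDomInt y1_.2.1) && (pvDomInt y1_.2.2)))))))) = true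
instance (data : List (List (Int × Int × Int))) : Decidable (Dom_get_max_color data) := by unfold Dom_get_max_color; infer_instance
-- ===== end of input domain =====

-- B replaces A's sequential running-max vector with a divide-and-conquer componentwise-max reduction of each game; objective: alternative.

-- ===== PORT A =====
def get_max_color (data : List (List (Int × Int × Int))) : List (List Int) :=
  data.foldl (fun new_data game =>
    let game_max : Int × Int × Int :=
      game.foldl (fun gm pick =>
        -- the inner `for i in range(3)` unrolled: one compare-and-update per component
        let g0 := if pick.1 > gm.1 then pick.1 else gm.1
        let g1 := if pick.2.1 > gm.2.1 then pick.2.1 else gm.2.1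
        let g2 := if pick.2.2 > gm.2.2 then pick.2.2 else gm.2.2
        (g0, g1, g2)) (0, 0, 0)
    new_data ++ [[game_max.1, game_max.2.1, game_max.2.2]]) []

-- ===== PORT B =====
def pvCombine (p q : Int × Int × Int) : Int × Int × Int :=
  (max p.1 q.1, max p.2.1 q.2.1, max p.2.2 q.2.2)

-- divide-and-conquer reduction of game[lo:hi]; Python raises IndexError only if lo is out of
-- range, which no call site reaches (callers keep lo < hi ≤ game.length), so the `.getD` default
-- and the `hi ≤ lo` totality guard are unreachable.
def pvReduce (game : List (Int × Int × Int)) (lo hi : Nat) : Int × Int × Int :=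
  if hi - lo = 1 then
    (PySem.List.pyGet? game (lo : Int)).getD (0, 0, 0)
  else if hi ≤ lo then (0, 0, 0)  -- unreachable totality guard
  else
    let mid := (lo + hi) / 2
    pvCombine (pvReduce game lo mid) (pvReduce game mid hi)
termination_by hi - lo
decreasing_by all_goals omega

def get_max_color_alt (data : List (List (Int × Int × Int))) : List (List Int) :=
  data.map (fun game =>
    if game.isEmpty then [0, 0, 0]
    else
      let m := pvCombine (0, 0, 0) (pvReduce game 0 game.length)
      [m.1, m.2.1, m.2.2])

-- ===== PRECONDITION & SPEC =====
def Spec_get_max_color (data : List (List (Int × Int × Int))) (out : List (List Int)) : Prop := out = get_max_color_alt data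
instance (data : List (List (Int × Int × Int))) (out : List (List Int)) : Decidable (Spec_get_max_color data out) := by unfold Spec_get_max_color; infer_instance

-- ===== CLAIM (what is proved, stated in full; the proofs are below) =====
def Claim_equal_get_max_color : Prop := ∀ (data : List (List (Int × Int × Int))), Dom_get_max_color data → Spec_get_max_color data (get_max_color data)

-- ===== LEMMAS AND PROOFS =====

theorem pvCombine_assoc (a b c : Int × Int × Int) :
    pvCombine (pvCombine a b) c = pvCombine a (pvCombine b c) := by
  simp [pvCombine, max_assoc]

-- the D&C reduction, combined into any left accumulator, is the left fold of pvCombine over the slice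
theorem reduce_foldl (n : Nat) : ∀ (game : List (Int × Int × Int)) (lo hi : Nat),
    hi - lo = n → lo < hi → hi ≤ game.length → ∀ z : Int × Int × Int,
    pvCombine z (pvReduce game lo hi)
      = ((game.drop lo).take (hi - lo)).foldl pvCombine z := by
  induction n using Nat.strong_induction_on with
  | _ n ih =>
    intro game lo hi hn hlo hhi z
    rw [pvReduce]
    by_cases h1 : hi - lo = 1
    · have hlt : lo < game.length := by omega
      have hdrop : game.drop lo = game[lo] :: game.drop (lo + 1) :=
        List.drop_eq_getElem_cons hlt
      rw [if_pos h1, PySem.List.pyGet?_natCast, List.getElem?_eq_getElem hlt,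
          Option.getD_some, h1, hdrop]
      rfl
    · have h2 : ¬ hi ≤ lo := by omega
      simp only [h1, h2, if_false]
      obtain ⟨mid, hmid⟩ : ∃ m, (lo + hi) / 2 = m := ⟨_, rfl⟩
      rw [hmid]
      have hb : lo < mid ∧ mid < hi := by omega
      have e1 : pvCombine z (pvCombine (pvReduce game lo mid) (pvReduce game mid hi))
          = pvCombine (pvCombine z (pvReduce game lo mid)) (pvReduce game mid hi) :=
        (pvCombine_assoc _ _ _).symm
      rw [e1, ih (mid - lo) (by omega) game lo mid rfl hb.1 (by omega),
          ih (hi - mid) (by omega) game mid hi rfl hb.2 hhi]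
      have hsplit : (game.drop lo).take (hi - lo)
          = (game.drop lo).take (mid - lo) ++ (game.drop mid).take (hi - mid) := by
        have hsum : hi - lo = (mid - lo) + (hi - mid) := by omega
        have hdd : lo + (mid - lo) = mid := by omega
        rw [hsum, List.take_add, List.drop_drop, hdd]
      rw [hsplit, List.foldl_append]

-- A's inner compare-and-update fold is a left fold of pvCombine
theorem inner_fold_eq (game : List (Int × Int × Int)) (z : Int × Int × Int) :
    game.foldl (fun gm pick =>
        let g0 := if pick.1 > gm.1 then pick.1 else gm.1
        let g1 := if pick.2.1 > gm.2.1 then pick.2.1 else gm.2.1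
        let g2 := if pick.2.2 > gm.2.2 then pick.2.2 else gm.2.2
        (g0, g1, g2)) z
    = game.foldl pvCombine z := by
  have h : (fun (gm pick : Int × Int × Int) =>
        let g0 := if pick.1 > gm.1 then pick.1 else gm.1
        let g1 := if pick.2.1 > gm.2.1 then pick.2.1 else gm.2.1
        let g2 := if pick.2.2 > gm.2.2 then pick.2.2 else gm.2.2
        (g0, g1, g2)) = pvCombine := by
    funext gm pick
    simp [pvCombine, Prod.ext_iff, max_def]
    omega
  rw [h]

theorem per_game_eq (game : List (Int × Int × Int)) :
    game.foldl pvCombine (0, 0, 0)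
      = (if game.isEmpty then ((0 : Int), (0 : Int), (0 : Int))
         else pvCombine (0, 0, 0) (pvReduce game 0 game.length)) := by
  by_cases hg : game.isEmpty
  · rw [List.isEmpty_iff] at hg; subst hg; simp
  · have hpos : 0 < game.length := by cases game with | nil => simp at hg | cons _ _ => simp
    rw [if_neg hg,
        reduce_foldl game.length game 0 game.length (by omega) hpos le_rfl]
    simp

theorem outer_fold_eq (data : List (List (Int × Int × Int))) (acc : List (List Int)) :
    data.foldl (fun new_data game =>
      let game_max : Int × Int × Int :=
        game.foldl (fun gm pick =>
          let g0 := if pick.1 > gm.1 then pick.1 else gm.1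
          let g1 := if pick.2.1 > gm.2.1 then pick.2.1 else gm.2.1
          let g2 := if pick.2.2 > gm.2.2 then pick.2.2 else gm.2.2
          (g0, g1, g2)) (0, 0, 0)
      new_data ++ [[game_max.1, game_max.2.1, game_max.2.2]]) acc
    = acc ++ get_max_color_alt data := by
  induction data generalizing acc with
  | nil => simp [get_max_color_alt]
  | cons g t ih =>
    rw [List.foldl_cons, ih]
    simp only [get_max_color_alt, List.map_cons, inner_fold_eq, per_game_eq]
    by_cases hg : g.isEmpty <;> simp [hg]

-- ===== VERDICT (by name: the statement is the Claim_ definition above) =====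
theorem get_max_color_spec : Claim_equal_get_max_color := by
  intro data _
  unfold Spec_get_max_color get_max_color
  rw [outer_fold_eq]
  simp
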